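-- pv_equiv track=rewrite | github.com/ludwings0330/algo | coding-test/2022_썸머코딩_코딩테스트/Q2.py | solution
-- ===== SOURCE A (Python) =====
-- from collections import defaultdict
--
-- def get_dist(rooms, target):
--     return min([abs(room - target) for room in rooms])
--
-- def parse_room_data(data):
--     room_number = int(data[1:data.find(']')])
--     names = data[data.find(']') + 1 :].split(',')
--     return room_number, names
--
-- def solution(rooms, target):
--     answer = []
--     person_info = defaultdict(list)
--     excluded = []
--
--     for room in rooms:
--         room_number, names = parse_room_data(room)
--
--         if room_number == target:
--             excluded = names
--
--         for name in names:
--             person_info[name].append(room_number)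
--
--     for name in excluded:
--         del(person_info[name])
--
--     person_list = []
--     for name in person_info:
--         person_list.append([name, len(person_info[name]), get_dist(person_info[name], target)])
--
--     person_list.sort(key = lambda x: (x[1], x[2], x[0]))
--     return [person[0] for person in person_list]
-- ===== SOURCE B (Python) =====
-- from collections import deque
--
-- def _runs(events):
--     # events is sorted by (name, distance): equal names are contiguous and each
--     # run's first entry carries its smallest distance.  Scan once, keeping the
--     # current run at the front of a deque of finished runs.
--     runs = deque()
--     for name, dist in events:
--         if runs and runs[0][2] == name:
--             count, d, _ = runs[0]
--             runs[0] = (count + 1, d, name)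
--         else:
--             runs.appendleft((1, dist, name))
--     return list(runs)
--
-- def solution(rooms, target):
--     events = []
--     excluded = []
--     for room in rooms:
--         bracket = room.find(']')
--         number = int(room[1:bracket])
--         names = room[bracket + 1:].split(',')
--         if number == target:
--             excluded = names
--         events += [(name, abs(number - target)) for name in names]
--     events.sort()
--     result = [run for run in _runs(events) if run[2] not in excluded]
--     result.sort()
--     return [name for _, _, name in result]
-- ===== Notes on version B (the rewrite author's own statement) =====
-- stated objective: alternative
-- what changed: B replaces A's name->list-of-room-numbers grouping dict and per-name get_dist min pass by a sort-then-scan group-by: it flattens the rooms to a flat (name, distance) event list, sorts it so equal names are contiguous with the smallest distance first, and reads count/min-distance off each run in one scan before the final (count, distance, name) sort.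
import Mathlib
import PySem

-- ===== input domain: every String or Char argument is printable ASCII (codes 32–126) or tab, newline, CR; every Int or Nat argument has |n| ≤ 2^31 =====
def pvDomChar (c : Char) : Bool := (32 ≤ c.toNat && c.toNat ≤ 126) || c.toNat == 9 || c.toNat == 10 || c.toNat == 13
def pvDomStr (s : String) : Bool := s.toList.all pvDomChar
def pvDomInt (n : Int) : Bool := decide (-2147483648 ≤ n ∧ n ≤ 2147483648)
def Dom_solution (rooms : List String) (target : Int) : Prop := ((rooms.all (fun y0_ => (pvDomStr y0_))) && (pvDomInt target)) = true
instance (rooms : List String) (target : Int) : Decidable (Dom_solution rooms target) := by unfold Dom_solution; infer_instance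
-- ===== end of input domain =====

-- B replaces A's name->list-of-rooms grouping dict (plus a per-name min pass) by a sort-then-scan
-- group-by over a flat (name, distance) event list (objective: alternative).

-- shared parsing helpers: the two lines of A's parse_room_data, also used verbatim by B's inline parse
-- room_number = int(data[1:data.find(']')]); int() ValueError → none (those inputs are excluded by Pre_)
def roomNum? (data : String) : Option Int :=
  PySem.Int.ofStr? (PySem.Str.slice data (some 1) (some (PySem.Str.find data "]")))
-- names = data[data.find(']') + 1:].split(',') ; the separator "," is nonempty so split? is never none
def roomNames (data : String) : List String :=
  (PySem.Str.split? (PySem.Str.slice data (some (PySem.Str.find data "]" + 1)) none) ",").getD []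

-- ===== PORT A =====
-- get_dist: min over the |room - target| list; the list is nonempty whenever A calls it, so getD 0 is unreachable
def getDist (rooms : List Int) (target : Int) : Int :=
  (PySem.List.min? (rooms.map (fun room => |room - target|)) (fun x => x)).getD 0

-- parse_room_data; getD 0 totalises the int() ValueError case, which Pre_ excludes
def parseRoomData (data : String) : Int × List String :=
  ((roomNum? data).getD 0, roomNames data)

-- body of A's main loop: person_info (defaultdict(list), modelled by getD _ []) and excluded
def stepA (target : Int) (st : PySem.Dict String (List Int) × List String) (room : String) :
    PySem.Dict String (List Int) × List String :=
  let (roomNumber, names) := parseRoomData room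
  let excluded := if roomNumber == target then names else st.2
  let info := names.foldl
    (fun d name => d.insert name (d.getD name [] ++ [roomNumber])) st.1
  (info, excluded)

def solution (rooms : List String) (target : Int) : List String :=
  let st := rooms.foldl (stepA target) (PySem.Dict.empty, [])
  -- for name in excluded: del person_info[name]  (KeyError on a repeated name: excluded by Pre_)
  let info := st.2.foldl (fun d name => d.erase name) st.1
  -- person_list = [[name, len(rooms), get_dist(rooms, target)] …] in dict order
  let personList := info.items.map (fun p => (p.1, ((p.2.length : Int), getDist p.2 target)))
  -- sort by the tuple (count, dist, name) and project the names
  (PySem.List.sorted personList (fun x => toLex (x.2.1, toLex (x.2.2, x.1.toList))) false).map (fun person => person.1)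

-- ===== PORT B =====
-- body of B's main loop: the flat (name, distance) event list and excluded
def stepB (target : Int) (st : List (String × Int) × List String) (room : String) :
    List (String × Int) × List String :=
  let number := (roomNum? room).getD 0      -- int(room[1:room.find(']')]); ValueError excluded by Pre_
  let names := roomNames room               -- room[bracket+1:].split(',')
  let excluded := if number == target then names else st.2
  (st.1 ++ names.map (fun name => (name, |number - target|)), excluded)

-- _runs: one scan of the sorted events; the current run sits at the front of the deque
-- (runs[0] is the head of the accumulator list, appendleft is cons)
def runsB (events : List (String × Int)) : List (Int × Int × String) :=
  events.foldl (fun runs e =>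
    match runs with
    | (count, d, m) :: rest =>
        if m == e.1 then (count + 1, d, m) :: rest
        else (1, e.2, e.1) :: (count, d, m) :: rest
    | [] => [(1, e.2, e.1)]) []

def solution_alt (rooms : List String) (target : Int) : List String :=
  let st := rooms.foldl (stepB target) ([], [])
  -- events.sort(): Python's lexicographic tuple order on (name, distance)
  let events := PySem.List.sorted2 st.1 (fun e => e.1.toList) (fun e => e.2)
  -- result = [run for run in _runs(events) if run[2] not in excluded]
  let result := (runsB events).filter (fun run => !st.2.contains run.2.2)
  -- result.sort(): lexicographic on (count, distance, name); then project the names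
  (PySem.List.sorted result (fun t => toLex (t.1, toLex (t.2.1, t.2.2.toList))) false).map (fun t => t.2.2)

-- ===== PRECONDITION & SPEC =====
-- Pre_ excludes exactly the inputs where the Python A raises: a room whose bracket part is not an int
-- (ValueError), and a duplicated name in the last target room (KeyError in the del loop).
def Pre_solution (rooms : List String) (target : Int) : Prop :=
  (∀ room ∈ rooms, (roomNum? room).isSome) ∧
  (∀ i < rooms.length,
    ((roomNum? rooms[i]!).getD 0 = target ∧
      ∀ j < rooms.length, i < j → (roomNum? rooms[j]!).getD 0 ≠ target) →
    (roomNames rooms[i]!).Nodup)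
instance (rooms : List String) (target : Int) : Decidable (Pre_solution rooms target) := by
  unfold Pre_solution; infer_instance

def pvWitness_solution : List String × Int := (["[3]alice,bob", "[5]bob,carl", "[5]dan"], 5)

def Spec_solution (rooms : List String) (target : Int) (out : List String) : Prop := out = solution_alt rooms target
instance (rooms : List String) (target : Int) (out : List String) : Decidable (Spec_solution rooms target out) := by unfold Spec_solution; infer_instance

-- ===== CLAIM (what is proved, stated in full; the proofs are below) =====
def Claim_equal_solution : Prop := ∀ (rooms : List String) (target : Int), Dom_solution rooms target → Pre_solution rooms target → Spec_solution rooms target (solution rooms target)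

-- ===== LEMMAS AND PROOFS =====

-- spec-level abstractions shared by the two directions
def pvNames (rooms : List String) : List String := rooms.flatMap roomNames
def pvP (rooms : List String) : List (String × Int) :=
  rooms.flatMap (fun room => (roomNames room).map (fun n => (n, (roomNum? room).getD 0)))
def pvE (rooms : List String) (target : Int) : List (String × Int) :=
  rooms.flatMap (fun room => (roomNames room).map (fun n => (n, |(roomNum? room).getD 0 - target|)))
def pvEx (rooms : List String) (target : Int) : List String :=
  rooms.foldl (fun ex room => if (roomNum? room).getD 0 == target then roomNames room else ex) []
def pvCnt (S : List (String × Int)) (x : String) : Int := (S.countP (fun e => e.1 == x) : Int)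
def pvMin (S : List (String × Int)) (x : String) : Int :=
  ((PySem.List.min? ((S.filter (fun e => e.1 == x)).map (fun e => e.2)) (fun v => v)).getD 0)
def pvKeyE : String × Int → Lex (List Char × Int) := fun e => toLex (e.1.toList, e.2)
def pvKeyB : Int × Int × String → Lex (Int × Lex (Int × List Char)) := fun t => toLex (t.1, toLex (t.2.1, t.2.2.toList))
def pvKeyA : String × Int × Int → Lex (Int × Lex (Int × List Char)) := fun p => toLex (p.2.1, toLex (p.2.2, p.1.toList))
def pvG : String × Int × Int → Int × Int × String := fun p => (p.2.1, p.2.2, p.1)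
-- the distinct names of a (sorted) event list, one per run
def pvHeads : List (String × Int) → List String
  | [] => []
  | e :: tl => e.1 :: pvHeads (tl.dropWhile (fun x => x.1 == e.1))
termination_by l => l.length
decreasing_by
  have := List.length_dropWhile_le (fun x : String × Int => x.1 == e.1) tl
  simp; omega
-- A's value, in closed form
def pvLA (rooms : List String) (target : Int) : List (String × Int × Int) :=
  ((PySem.Set.ofList (pvNames rooms)).filter (fun n => !(pvEx rooms target).contains n)).map
    (fun n => (n, pvCnt (pvE rooms target) n, pvMin (pvE rooms target) n))

-- ---- generic small lemmas ----
theorem foldl_min_eq_self (t : List Int) (a : Int) (h : ∀ y ∈ t, a ≤ y) : t.foldl min a = a := by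
  induction t with
  | nil => rfl
  | cons y t ih =>
    simp only [List.foldl_cons]
    rw [min_eq_left (h y (by simp))]
    exact ih (fun z hz => h z (by simp [hz]))

theorem min?_eq_of_perm (l₁ l₂ : List Int) (h : l₁.Perm l₂) :
    PySem.List.min? l₁ (fun v => v) = PySem.List.min? l₂ (fun v => v) := by
  cases h1 : PySem.List.min? l₁ (fun v => v) with
  | none =>
    rw [PySem.List.min?_eq_none_iff] at h1
    subst h1
    rw [← h.nil_eq]
    exact ((PySem.List.min?_eq_none_iff [] (fun v => v)).mpr rfl).symm
  | some m =>
    cases h2 : PySem.List.min? l₂ (fun v => v) with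
    | none =>
      rw [PySem.List.min?_eq_none_iff] at h2
      subst h2
      rw [h.symm.nil_eq.symm, (PySem.List.min?_eq_none_iff [] (fun v => v)).mpr rfl] at h1
      exact absurd h1 (by simp)
    | some m' =>
      have hm := PySem.List.min?_mem h1
      have hm' := PySem.List.min?_mem h2
      have h1' := PySem.List.min?_isMin h1
      have h2' := PySem.List.min?_isMin h2
      exact congrArg some (le_antisymm (h1' m' (h.mem_iff.mpr hm')) (h2' m (h.mem_iff.mp hm)))

theorem sorted2_eq_sorted_lex (xs : List (String × Int)) :
    PySem.List.sorted2 xs (fun e => e.1.toList) (fun e => e.2)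
      = PySem.List.sorted xs pvKeyE false := by
  unfold PySem.List.sorted2 PySem.List.sorted
  show List.foldl (fun acc x => PySem.List.insertBy (fun a b => decide (a.1.toList < b.1.toList) || (!decide (b.1.toList < a.1.toList) && decide (a.2 < b.2))) x acc) [] xs
      = List.foldl (fun acc x => PySem.List.insertBy (fun a b => decide (pvKeyE a < pvKeyE b)) x acc) [] xs
  have hfg : (fun (a b : String × Int) => decide (a.1.toList < b.1.toList) || (!decide (b.1.toList < a.1.toList) && decide (a.2 < b.2)))
      = (fun a b => decide (pvKeyE a < pvKeyE b)) := by
    funext a b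
    simp only [pvKeyE, Prod.Lex.toLex_lt_toLex]
    rcases lt_trichotomy (a.1.toList) (b.1.toList) with h|h|h
    · simp [h]
    · simp [h]
    · simp [h, asymm h, ne_of_gt h]
  rw [hfg]

-- ---- A side ----
theorem stepA_split (target : Int) (rooms : List String)
    (d : PySem.Dict String (List Int)) (ex : List String) :
    rooms.foldl (stepA target) (d, ex)
      = (rooms.foldl (fun d room => (roomNames room).foldl
            (fun d n => d.insert n (d.getD n [] ++ [(roomNum? room).getD 0])) d) d,
         rooms.foldl (fun ex room =>
            if (roomNum? room).getD 0 == target then roomNames room else ex) ex) := by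
  induction rooms generalizing d ex with
  | nil => rfl
  | cons room rest ih =>
    simp only [List.foldl_cons]
    rw [show stepA target (d, ex) room
        = ((roomNames room).foldl (fun d n => d.insert n (d.getD n [] ++ [(roomNum? room).getD 0])) d,
           if (roomNum? room).getD 0 == target then roomNames room else ex) from rfl]
    exact ih _ _

theorem stepB_split (target : Int) (rooms : List String)
    (ev : List (String × Int)) (ex : List String) :
    rooms.foldl (stepB target) (ev, ex)
      = (rooms.foldl (fun acc room => acc ++ (roomNames room).map
            (fun n => (n, |(roomNum? room).getD 0 - target|))) ev,
         rooms.foldl (fun ex room =>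
            if (roomNum? room).getD 0 == target then roomNames room else ex) ex) := by
  induction rooms generalizing ev ex with
  | nil => rfl
  | cons room rest ih =>
    simp only [List.foldl_cons]
    rw [show stepB target (ev, ex) room
        = (ev ++ (roomNames room).map (fun n => (n, |(roomNum? room).getD 0 - target|)),
           if (roomNum? room).getD 0 == target then roomNames room else ex) from rfl]
    exact ih _ _

theorem items_foldl_erase (ex : List String) (d : PySem.Dict String (List Int)) :
    (ex.foldl (fun d name => d.erase name) d).items
      = d.items.filter (fun p => !ex.contains p.1) := by
  induction ex generalizing d with
  | nil => simp
  | cons n rest ih =>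
    simp only [List.foldl_cons]
    rw [ih]
    rw [show (d.erase n).items = d.items.filter (fun p => !(p.1 == n)) from rfl]
    rw [List.filter_filter]
    apply List.filter_congr
    intro p _
    simp only [List.contains_cons]
    cases hpn : p.1 == n <;> cases hpr : rest.contains p.1 <;> simp_all

-- the dict A builds, in closed form: one item per distinct name, carrying its room list
theorem dictA_items (rooms : List String) :
    (rooms.foldl (fun d room => (roomNames room).foldl
        (fun d n => d.insert n (d.getD n [] ++ [(roomNum? room).getD 0])) d)
        (PySem.Dict.empty : PySem.Dict String (List Int))).items
      = (PySem.Set.ofList (pvNames rooms)).map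
          (fun n => (n, ((pvP rooms).filter (fun p => p.1 == n)).map (fun p => p.2))) := by
  have hmod : ∀ (d : PySem.Dict String (List Int)) (n : String) (v : Int),
      d.insert n (d.getD n [] ++ [v]) = d.modify n [] (fun x => x ++ [v]) := fun _ _ _ => rfl
  have hfold : rooms.foldl (fun d room => (roomNames room).foldl
        (fun d n => d.insert n (d.getD n [] ++ [(roomNum? room).getD 0])) d)
        (PySem.Dict.empty : PySem.Dict String (List Int))
      = (pvP rooms).foldl (fun d p => d.modify p.1 [] (fun x => x ++ [p.2])) PySem.Dict.empty := by
    rw [pvP, List.foldl_flatMap]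
    simp only [List.foldl_map, hmod]
  rw [hfold]
  have hnodup : ((pvP rooms).foldl (fun d p => d.modify p.1 [] (fun x => x ++ [p.2]))
      (PySem.Dict.empty : PySem.Dict String (List Int))).keys.Nodup := by
    apply PySem.Dict.nodup_keys_foldl_modify_key (pvP rooms) (fun p => p.1) []
      (fun d p => (fun x => x ++ [p.2]))
    simp [PySem.Dict.keys_empty]
  rw [PySem.Dict.items_eq_map_keys _ hnodup []]
  have hkeys : ((pvP rooms).foldl (fun d p => d.modify p.1 [] (fun x => x ++ [p.2]))
      (PySem.Dict.empty : PySem.Dict String (List Int))).keys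
      = PySem.Set.ofList (pvNames rooms) := by
    rw [PySem.Dict.keys_foldl_modify_key (pvP rooms) (fun p => p.1) []
      (fun d p => (fun x => x ++ [p.2]))]
    rw [show (PySem.Dict.empty : PySem.Dict String (List Int)).keys = ([] : List String) from rfl]
    rw [show ((pvP rooms).map (fun p => p.1)) = pvNames rooms by
      simp [pvP, pvNames, List.map_flatMap, Function.comp_def]]
    rfl
  rw [hkeys]
  apply List.map_congr_left
  intro n _
  rw [PySem.Dict.getD_foldl_modify_append (pvP rooms) PySem.Dict.empty n]
  simp [PySem.Dict.getD_empty]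

theorem pvE_eq_map (rooms : List String) (target : Int) :
    pvE rooms target = (pvP rooms).map (fun p => (p.1, |p.2 - target|)) := by
  simp [pvE, pvP, List.map_flatMap, Function.comp_def]

theorem pvE_names (rooms : List String) (target : Int) :
    (pvE rooms target).map (fun e => e.1) = pvNames rooms := by
  simp [pvE, pvNames, List.map_flatMap, Function.comp_def]

-- A's result as a sort of the closed form
theorem solution_eq_sorted (rooms : List String) (target : Int) :
    solution rooms target
      = (PySem.List.sorted (pvLA rooms target) pvKeyA false).map (fun p => p.1) := by
  unfold solution
  rw [stepA_split]
  have hex : rooms.foldl (fun ex room =>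
      if (roomNum? room).getD 0 == target then roomNames room else ex) [] = pvEx rooms target := rfl
  rw [hex]
  show (PySem.List.sorted ((((pvEx rooms target).foldl (fun d name => d.erase name)
        (rooms.foldl (fun d room => (roomNames room).foldl
          (fun d n => d.insert n (d.getD n [] ++ [(roomNum? room).getD 0])) d)
          PySem.Dict.empty)).items).map
        (fun p => (p.1, ((p.2.length : Int), getDist p.2 target))))
      (fun x => toLex (x.2.1, toLex (x.2.2, x.1.toList))) false).map (fun person => person.1)
    = (PySem.List.sorted (pvLA rooms target) pvKeyA false).map (fun p => p.1)
  rw [items_foldl_erase, dictA_items]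
  rw [List.filter_map]
  have hpred : ((fun p : String × List Int => !(pvEx rooms target).contains p.1) ∘
      (fun n => (n, ((pvP rooms).filter (fun p => p.1 == n)).map (fun p => p.2))))
      = fun n => !(pvEx rooms target).contains n := rfl
  rw [hpred, List.map_map]
  have hent : ∀ n ∈ (PySem.Set.ofList (pvNames rooms)).filter (fun n => !(pvEx rooms target).contains n),
      ((fun p : String × List Int => (p.1, ((p.2.length : Int), getDist p.2 target))) ∘
        (fun n => (n, ((pvP rooms).filter (fun p => p.1 == n)).map (fun p => p.2)))) n
      = (fun n => (n, pvCnt (pvE rooms target) n, pvMin (pvE rooms target) n)) n := by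
    intro n _
    simp only [Function.comp_apply]
    refine congrArg (fun z => (n, z)) ?_
    refine Prod.ext ?_ ?_
    · -- count
      simp only [pvCnt, pvE_eq_map, List.countP_map, List.length_map]
      rw [← List.countP_eq_length_filter]
      rfl
    · -- min
      simp only [getDist, pvMin, pvE_eq_map, List.map_map, List.filter_map]
      rfl
  rw [List.map_congr_left hent]
  rfl

-- ---- B side ----
-- the loop body of runsB, named so the lemmas can speak about it
def pvStep : List (Int × Int × String) → (String × Int) → List (Int × Int × String) :=
  fun runs e =>
    match runs with
    | (count, d, m) :: rest =>
        if m == e.1 then (count + 1, d, m) :: rest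
        else (1, e.2, e.1) :: (count, d, m) :: rest
    | [] => [(1, e.2, e.1)]

theorem runsB_eq_foldl (S : List (String × Int)) : runsB S = S.foldl pvStep [] := rfl

-- in a key-sorted list every element after the dropped prefix has a different name
theorem dropWhile_ne_head (e : String × Int) (tl : List (String × Int))
    (hs : (e :: tl).Pairwise (fun a b => pvKeyE a ≤ pvKeyE b)) :
    ∀ pr ∈ tl.dropWhile (fun x => x.1 == e.1), pr.1 ≠ e.1 := by
  rcases List.pairwise_cons.mp hs with ⟨hhead, htl⟩
  cases hd : tl.dropWhile (fun x => x.1 == e.1) with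
  | nil => simp
  | cons y ys =>
    have hy : ¬(y.1 == e.1) = true := by
      have := List.head?_dropWhile_not (fun x => x.1 == e.1) tl
      rw [hd] at this
      simpa using this
    have hymem : y ∈ tl := (List.dropWhile_sublist (l := tl)
      (p := fun x : String × Int => x.1 == e.1)).mem (by rw [hd]; exact List.mem_cons_self ..)
    have hyk : pvKeyE e ≤ pvKeyE y := hhead y hymem
    have hylt : e.1.toList < y.1.toList := by
      rcases (Prod.Lex.toLex_le_toLex.mp hyk) with h | ⟨h1, _⟩
      · exact h
      · exact absurd (String.toList_inj.mp h1).symm (by simpa using hy)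
    intro pr hpr
    rcases List.mem_cons.mp hpr with rfl | hpr'
    · simpa using hy
    · have hdw : (y :: ys).Pairwise (fun a b => pvKeyE a ≤ pvKeyE b) := by
        rw [← hd]; exact htl.sublist (List.dropWhile_sublist _)
      have hyz : pvKeyE y ≤ pvKeyE pr := (List.pairwise_cons.mp hdw).1 pr hpr'
      have : y.1.toList ≤ pr.1.toList := by
        rcases (Prod.Lex.toLex_le_toLex.mp hyz) with h | ⟨h1, _⟩
        · exact le_of_lt h
        · exact le_of_eq h1
      intro hcontra
      rw [hcontra] at this
      exact absurd (lt_of_lt_of_le hylt this) (lt_irrefl _)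

theorem pvHeads_mem (S : List (String × Int)) (x : String) :
    x ∈ pvHeads S ↔ x ∈ S.map (fun e => e.1) := by
  induction S using pvHeads.induct with
  | case1 => simp [pvHeads]
  | case2 e tl ih =>
    rw [pvHeads]
    simp only [List.mem_cons, List.map_cons, ih]
    constructor
    · rintro (rfl | h)
      · exact Or.inl rfl
      · rcases List.mem_map.mp h with ⟨pr, hpr, rfl⟩
        exact Or.inr (List.mem_map.mpr ⟨pr, (List.dropWhile_sublist _).mem hpr, rfl⟩)
    · rintro (rfl | h)
      · exact Or.inl rfl
      · rcases List.mem_map.mp h with ⟨pr, hpr, rfl⟩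
        rw [← List.takeWhile_append_dropWhile (p := fun x : String × Int => x.1 == e.1) (l := tl)] at hpr
        rcases List.mem_append.mp hpr with hpr | hpr
        · exact Or.inl (by simpa using List.mem_takeWhile_imp hpr)
        · exact Or.inr (List.mem_map.mpr ⟨pr, hpr, rfl⟩)

theorem pvHeads_nodup (S : List (String × Int))
    (hs : S.Pairwise (fun a b => pvKeyE a ≤ pvKeyE b)) : (pvHeads S).Nodup := by
  induction S using pvHeads.induct with
  | case1 => simp [pvHeads]
  | case2 e tl ih =>
    rw [pvHeads]
    refine List.nodup_cons.mpr ⟨?_, ih (hs.sublist ((List.dropWhile_sublist _).cons _))⟩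
    intro hmem
    rcases List.mem_map.mp ((pvHeads_mem _ _).mp hmem) with ⟨pr, hpr, hpr1⟩
    exact dropWhile_ne_head e tl hs pr hpr hpr1

theorem pvStep_push (acc : List (Int × Int × String)) (e : String × Int)
    (h : ∀ c d m rest, acc = (c, d, m) :: rest → m ≠ e.1) :
    pvStep acc e = (1, e.2, e.1) :: acc := by
  cases acc with
  | nil => rfl
  | cons p rest =>
    obtain ⟨c, d, m⟩ := p
    show (if (m == e.1) = true then (c + 1, d, m) :: rest
        else (1, e.2, e.1) :: (c, d, m) :: rest) = (1, e.2, e.1) :: (c, d, m) :: rest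
    rw [if_neg (by simpa using h c d m rest rfl)]

theorem pvStep_run (run : List (String × Int)) (c d : Int) (m : String)
    (acc : List (Int × Int × String)) (h : ∀ x ∈ run, x.1 = m) :
    run.foldl pvStep ((c, d, m) :: acc) = (c + (run.length : Int), d, m) :: acc := by
  induction run generalizing c with
  | nil => simp
  | cons x run' ih =>
    simp only [List.foldl_cons]
    rw [show pvStep ((c, d, m) :: acc) x = (c + 1, d, m) :: acc by
      show (if (m == x.1) = true then (c + 1, d, m) :: acc
          else (1, x.2, x.1) :: (c, d, m) :: acc) = (c + 1, d, m) :: acc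
      rw [if_pos (by simp [h x (by simp)])]]
    rw [ih _ (fun z hz => h z (by simp [hz]))]
    have : c + 1 + ((run'.length : Int)) = c + (((x :: run').length : Int)) := by
      simp [List.length_cons]; ring
    rw [this]

theorem runs_go (S : List (String × Int)) :
    S.Pairwise (fun a b => pvKeyE a ≤ pvKeyE b) →
    ∀ acc : List (Int × Int × String),
      (∀ c d m rest, acc = (c, d, m) :: rest → m ∉ S.map (fun e => e.1)) →
    (S.foldl pvStep acc).Perm (acc ++ (pvHeads S).map (fun x => (pvCnt S x, pvMin S x, x))) := by
  induction S using pvHeads.induct with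
  | case1 => intro _ acc _; simp [pvHeads]
  | case2 e tl ih =>
    intro hs acc hacc
    rcases List.pairwise_cons.mp hs with ⟨hhead, htl⟩
    have htw_names : ∀ x ∈ tl.takeWhile (fun x : String × Int => x.1 == e.1), x.1 = e.1 :=
      fun x hx => by simpa using List.mem_takeWhile_imp hx
    have hdw_ne := dropWhile_ne_head e tl hs
    have hs_dw : (tl.dropWhile (fun x : String × Int => x.1 == e.1)).Pairwise
        (fun a b => pvKeyE a ≤ pvKeyE b) := htl.sublist (List.dropWhile_sublist _)
    -- run the fold: first step pushes a fresh run, the takeWhile prefix bumps it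
    have step0 : pvStep acc e = (1, e.2, e.1) :: acc := by
      apply pvStep_push
      intro c d m rest hrest hme
      exact hacc c d m rest hrest (by simp [hme])
    have hsplit : (e :: tl).foldl pvStep acc
        = (tl.dropWhile (fun x : String × Int => x.1 == e.1)).foldl pvStep
            ((1 + ((tl.takeWhile (fun x : String × Int => x.1 == e.1)).length : Int), e.2, e.1) :: acc) := by
      rw [List.foldl_cons, step0,
        ← List.takeWhile_append_dropWhile (p := fun x : String × Int => x.1 == e.1) (l := tl),
        List.foldl_append, pvStep_run _ _ _ _ _ htw_names]
      rw [List.takeWhile_append_dropWhile]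
    -- recurse on the dropWhile suffix
    have hIH := ih hs_dw
      ((1 + ((tl.takeWhile (fun x : String × Int => x.1 == e.1)).length : Int), e.2, e.1) :: acc)
      (by
        intro c d m rest hrest
        injection hrest with h1 h2
        injection h1 with _ h1'
        injection h1' with _ h1''
        subst h1'' h2
        intro hmem
        rcases List.mem_map.mp hmem with ⟨pr, hpr, hpr1⟩
        exact hdw_ne pr hpr hpr1)
    -- head entry of the spec list
    have hcnt_tl : tl.countP (fun x : String × Int => x.1 == e.1)
        = (tl.takeWhile (fun x : String × Int => x.1 == e.1)).length := by
      conv_lhs => rw [← List.takeWhile_append_dropWhile (p := fun x : String × Int => x.1 == e.1) (l := tl)]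
      rw [List.countP_append]
      rw [List.countP_eq_length.mpr (fun x hx => by simp [htw_names x hx])]
      rw [List.countP_eq_zero.mpr (fun x hx => by simpa using hdw_ne x hx), Nat.add_zero]
    have hcnt : pvCnt (e :: tl) e.1
        = 1 + ((tl.takeWhile (fun x : String × Int => x.1 == e.1)).length : Int) := by
      unfold pvCnt
      rw [List.countP_cons_of_pos (by simp), hcnt_tl]
      push_cast; ring
    have hfil_tl : tl.filter (fun x : String × Int => x.1 == e.1)
        = tl.takeWhile (fun x : String × Int => x.1 == e.1) := by
      conv_lhs => rw [← List.takeWhile_append_dropWhile (p := fun x : String × Int => x.1 == e.1) (l := tl)]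
      rw [List.filter_append]
      rw [List.filter_eq_self.mpr (fun x hx => by simp [htw_names x hx])]
      rw [List.filter_eq_nil_iff.mpr (fun x hx => by simpa using hdw_ne x hx), List.append_nil]
    have hmin : pvMin (e :: tl) e.1 = e.2 := by
      unfold pvMin
      rw [List.filter_cons_of_pos (by simp), hfil_tl, List.map_cons, PySem.List.min?_id_cons]
      rw [foldl_min_eq_self _ _ (by
        intro y hy
        rcases List.mem_map.mp hy with ⟨x, hx, rfl⟩
        have hx1 : x.1 = e.1 := htw_names x hx
        have hxk : pvKeyE e ≤ pvKeyE x :=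
          hhead x ((List.takeWhile_sublist _).mem hx)
        rcases Prod.Lex.toLex_le_toLex.mp hxk with h | ⟨_, h2⟩
        · rw [hx1] at h; exact absurd h (lt_irrefl _)
        · exact h2)]
      rfl
    -- tail entries agree between the suffix and the full list
    have htail : (pvHeads (tl.dropWhile (fun x : String × Int => x.1 == e.1))).map
          (fun x => (pvCnt (tl.dropWhile (fun x : String × Int => x.1 == e.1)) x,
                     pvMin (tl.dropWhile (fun x : String × Int => x.1 == e.1)) x, x))
        = (pvHeads (tl.dropWhile (fun x : String × Int => x.1 == e.1))).map
          (fun x => (pvCnt (e :: tl) x, pvMin (e :: tl) x, x)) := by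
      apply List.map_congr_left
      intro x hx
      rcases List.mem_map.mp ((pvHeads_mem _ _).mp hx) with ⟨pr, hpr, hpr1⟩
      have hxne : x ≠ e.1 := hpr1 ▸ hdw_ne pr hpr
      have hfil : (e :: tl).filter (fun y : String × Int => y.1 == x)
          = (tl.dropWhile (fun y : String × Int => y.1 == e.1)).filter
              (fun y : String × Int => y.1 == x) := by
        rw [List.filter_cons_of_neg (by simpa using fun hc => hxne hc.symm)]
        conv_lhs => rw [← List.takeWhile_append_dropWhile (p := fun y : String × Int => y.1 == e.1) (l := tl)]
        rw [List.filter_append]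
        rw [List.filter_eq_nil_iff.mpr (fun y hy => by
          simp only [beq_iff_eq]
          rw [htw_names y hy]
          exact fun hc => hxne hc.symm), List.nil_append]
      have hc : pvCnt (e :: tl) x
          = pvCnt (tl.dropWhile (fun y : String × Int => y.1 == e.1)) x := by
        unfold pvCnt
        rw [List.countP_eq_length_filter, List.countP_eq_length_filter, hfil]
      have hm : pvMin (e :: tl) x
          = pvMin (tl.dropWhile (fun y : String × Int => y.1 == e.1)) x := by
        unfold pvMin
        rw [hfil]
      rw [hc, hm]
    -- assemble the permutation
    rw [hsplit, pvHeads]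
    refine hIH.trans ?_
    rw [List.map_cons, hcnt, hmin, ← htail]
    rw [List.cons_append]
    exact (List.perm_middle).symm

theorem runsB_perm (S : List (String × Int))
    (hs : S.Pairwise (fun a b => pvKeyE a ≤ pvKeyE b)) :
    (runsB S).Perm ((pvHeads S).map (fun x => (pvCnt S x, pvMin S x, x))) := by
  rw [runsB_eq_foldl]
  exact runs_go S hs [] (by simp)

-- ---- assembly ----
theorem solution_alt_eq (rooms : List String) (target : Int) :
    solution_alt rooms target
      = (PySem.List.sorted (pvLA rooms target) pvKeyA false).map (fun p => p.1) := by
  unfold solution_alt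
  rw [stepB_split]
  have hev : rooms.foldl (fun acc room => acc ++ (roomNames room).map
      (fun n => (n, |(roomNum? room).getD 0 - target|))) [] = pvE rooms target := by
    rw [PySem.List.foldl_append_eq_flatMap]; rfl
  have hex : rooms.foldl (fun ex room =>
      if (roomNum? room).getD 0 == target then roomNames room else ex) [] = pvEx rooms target := rfl
  rw [hev, hex]
  show (PySem.List.sorted ((runsB (PySem.List.sorted2 (pvE rooms target)
        (fun e => e.1.toList) (fun e => e.2))).filter
        (fun run => !(pvEx rooms target).contains run.2.2))
      (fun t => toLex (t.1, toLex (t.2.1, t.2.2.toList))) false).map (fun t => t.2.2)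
    = (PySem.List.sorted (pvLA rooms target) pvKeyA false).map (fun p => p.1)
  rw [sorted2_eq_sorted_lex]
  set S := PySem.List.sorted (pvE rooms target) pvKeyE false with hS
  set ex := pvEx rooms target with hEx
  have hsperm : S.Perm (pvE rooms target) := PySem.List.sorted_perm _ _ _
  have hs : S.Pairwise (fun a b => pvKeyE a ≤ pvKeyE b) := PySem.List.sorted_pairwise _ _
  -- B's filtered run list, up to permutation
  have hLB : ((runsB S).filter (fun run => !ex.contains run.2.2)).Perm
      (((pvHeads S).filter (fun n => !ex.contains n)).map
        (fun x => (pvCnt S x, pvMin S x, x))) := by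
    have := (runsB_perm S hs).filter (fun run => !ex.contains run.2.2)
    rwa [List.filter_map] at this
  -- per-name aggregates agree between S and the unsorted event list
  have hfS : ∀ n : String, (pvCnt S n, pvMin S n, n)
      = pvG (n, pvCnt (pvE rooms target) n, pvMin (pvE rooms target) n) := by
    intro n
    have hc : pvCnt S n = pvCnt (pvE rooms target) n := by
      unfold pvCnt
      rw [hsperm.countP_eq]
    have hm : pvMin S n = pvMin (pvE rooms target) n := by
      unfold pvMin
      rw [min?_eq_of_perm _ _ ((hsperm.filter _).map _)]
    rw [hc, hm]; rfl
  -- the two name lists are permutations of each other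
  have hnperm : ((pvHeads S).filter (fun n => !ex.contains n)).Perm
      ((PySem.Set.ofList (pvNames rooms)).filter (fun n => !ex.contains n)) := by
    rw [List.perm_ext_iff_of_nodup ((pvHeads_nodup S hs).filter _)
      ((PySem.Set.nodup_ofList _).filter _)]
    intro n
    simp only [List.mem_filter]
    have : n ∈ pvHeads S ↔ n ∈ PySem.Set.ofList (pvNames rooms) := by
      rw [pvHeads_mem, PySem.Set.mem_ofList, ← pvE_names rooms target]
      exact (hsperm.map (fun e => e.1)).mem_iff
    rw [this]
  -- B's list is a permutation of A's closed form pushed through pvG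
  have hperm2 : ((runsB S).filter (fun run => !ex.contains run.2.2)).Perm
      ((pvLA rooms target).map pvG) := by
    refine hLB.trans ?_
    rw [List.map_congr_left (fun n _ => hfS n)]
    have := (hnperm.map (fun n => pvG (n, pvCnt (pvE rooms target) n, pvMin (pvE rooms target) n)))
    refine this.trans ?_
    refine List.Perm.of_eq ?_
    rw [pvLA, ← hEx, List.map_map]
    exact List.map_congr_left (fun n _ => rfl)
  -- the sorted B list IS the sorted A list mapped through pvG
  have hnodupA : ((PySem.List.sorted (pvLA rooms target) pvKeyA false).map (fun p => p.1)).Nodup := by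
    have h1 : (pvLA rooms target).map (fun p => p.1)
        = (PySem.Set.ofList (pvNames rooms)).filter (fun n => !ex.contains n) := by
      rw [pvLA, List.map_map]
      exact List.map_id _
    have h2 := (PySem.List.sorted_perm (pvLA rooms target) pvKeyA false).map (fun p => p.1)
    rw [List.Perm.nodup_iff h2, h1]
    exact (PySem.Set.nodup_ofList _).filter _
  have hpairwise : ((PySem.List.sorted (pvLA rooms target) pvKeyA false).map pvG).Pairwise
      (fun a b => pvKeyB a < pvKeyB b) := by
    rw [List.pairwise_map]
    have hp1 := PySem.List.sorted_pairwise (pvLA rooms target) pvKeyA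
    have hp2 : (PySem.List.sorted (pvLA rooms target) pvKeyA false).Pairwise
        (fun a b => a.1 ≠ b.1) := List.pairwise_map.mp hnodupA
    refine (hp1.and hp2).imp ?_
    rintro a b ⟨hle, hne⟩
    refine lt_of_le_of_ne hle ?_
    intro hkey
    apply hne
    simp only [pvKeyB, pvG] at hkey
    have h2 := congrArg (fun z => (ofLex (ofLex z).2).2) hkey
    simp only [ofLex_toLex] at h2
    exact String.toList_inj.mp h2
  have hsortedB : PySem.List.sorted
        ((runsB S).filter (fun run => !ex.contains run.2.2)) pvKeyB false
      = (PySem.List.sorted (pvLA rooms target) pvKeyA false).map pvG := by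
    apply PySem.List.sorted_eq_of_perm_of_pairwise_lt
    · refine List.Perm.trans ?_ hperm2.symm
      exact ((PySem.List.sorted_perm (pvLA rooms target) pvKeyA false).map pvG)
    · exact hpairwise
  rw [show (fun t : Int × Int × String => toLex (t.1, toLex (t.2.1, t.2.2.toList))) = pvKeyB from rfl]
  rw [hsortedB, List.map_map]
  rfl

-- ===== VERDICT (by name: the statement is the Claim_ definition above) =====
theorem solution_spec : Claim_equal_solution := by
  intro rooms target _ _
  unfold Spec_solution
  rw [solution_eq_sorted, solution_alt_eq]
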